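-- pv_equiv track=rewrite | github.com/Gorane7/mata_ennustus | display.py | get_topics
-- ===== SOURCE A (Python) =====
-- def get_topics(meanings):
--     topics = {}
--     for i, meaning in enumerate(meanings):
--         if meaning["type"] in topics.keys():
--             if meaning["tag"] == "easy":
--                 topics[meaning["type"]]["easy"] = i
--             else:
--                 topics[meaning["type"]]["hard"] = i
--         else:
--             if meaning["tag"] == "easy":
--                 topics[meaning["type"]] = {"easy": i, "hard": None}
--             else:
--                 topics[meaning["type"]] = {"easy": None, "hard": i}
--     return topics
-- ===== SOURCE B (Python) =====
-- def get_topics(meanings):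
--     # per-type decomposition: ordered list of distinct types, then an
--     # independent last-matching-index scan for each (type, slot)
--     types = []
--     for meaning in meanings:
--         if meaning["type"] not in types:
--             types.append(meaning["type"])
--
--     def last_index(t, slot):
--         r = None
--         for i, meaning in enumerate(meanings):
--             if meaning["type"] == t and ("easy" if meaning["tag"] == "easy" else "hard") == slot:
--                 r = i
--         return r
--
--     return {t: {"easy": last_index(t, "easy"), "hard": last_index(t, "hard")} for t in types}
-- ===== Notes on version B (the rewrite author's own statement) =====
-- stated objective: alternative
-- what changed: Replaces A's single forward pass that mutates a dict-of-dicts in place with a per-type decomposition: first collect the distinct types in order of first appearance, then for each type and each slot run an independent last-matching-index scan.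
import Mathlib
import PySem

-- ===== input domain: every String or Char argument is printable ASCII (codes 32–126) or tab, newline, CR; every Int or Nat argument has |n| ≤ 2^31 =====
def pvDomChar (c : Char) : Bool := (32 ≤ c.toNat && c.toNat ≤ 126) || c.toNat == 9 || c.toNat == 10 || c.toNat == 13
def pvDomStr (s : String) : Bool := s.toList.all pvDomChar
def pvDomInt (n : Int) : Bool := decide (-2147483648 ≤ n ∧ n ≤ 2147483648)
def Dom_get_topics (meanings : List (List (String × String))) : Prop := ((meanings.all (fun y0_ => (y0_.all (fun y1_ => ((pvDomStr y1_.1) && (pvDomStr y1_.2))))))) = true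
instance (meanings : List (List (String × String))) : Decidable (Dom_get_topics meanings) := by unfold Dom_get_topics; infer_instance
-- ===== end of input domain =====

-- B replaces A's single-pass dict-mutation loop by a per-type decomposition
-- (ordered distinct types, then an independent last-matching-index scan per slot);
-- objective: alternative (not faster).


-- ===== PORT A =====
-- meaning["k"]: first-match lookup in the association list (total under Pre_, default "")
def pyKey (m : List (String × String)) (k : String) : String :=
  (PySem.Dict.mk m).getD k ""

-- the loop of A: topics dict built by one forward pass, last write wins
def pvTopicsDict (meanings : List (List (String × String))) :
    PySem.Dict String (PySem.Dict String (Option Int)) :=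
  (PySem.List.enumerate meanings 0).foldl (fun topics p =>
    if topics.contains (pyKey p.2 "type") then
      if pyKey p.2 "tag" == "easy" then
        topics.modify (pyKey p.2 "type") PySem.Dict.empty (fun d => d.insert "easy" (some p.1))
      else
        topics.modify (pyKey p.2 "type") PySem.Dict.empty (fun d => d.insert "hard" (some p.1))
    else
      if pyKey p.2 "tag" == "easy" then
        topics.insert (pyKey p.2 "type") (PySem.Dict.mk [("easy", some p.1), ("hard", none)])
      else
        topics.insert (pyKey p.2 "type") (PySem.Dict.mk [("easy", none), ("hard", some p.1)])
    ) PySem.Dict.empty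

def get_topics (meanings : List (List (String × String))) : List (String × List (String × Option Int)) :=
  (pvTopicsDict meanings).items.map (fun q => (q.1, q.2.items))

-- ===== PORT B =====
-- distinct types in order of first appearance
def pvTypes (meanings : List (List (String × String))) : List String :=
  meanings.foldl (fun ts m => if ts.contains (pyKey m "type") then ts else ts ++ [pyKey m "type"]) []

-- last index i whose meaning has this type and whose tag falls in this slot
def pvLastIndex (meanings : List (List (String × String))) (t slot : String) : Option Int :=
  (PySem.List.enumerate meanings 0).foldl (fun r p =>
    if pyKey p.2 "type" == t && ((if pyKey p.2 "tag" == "easy" then "easy" else "hard") == slot)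
    then some p.1 else r) none

def get_topics_alt (meanings : List (List (String × String))) : List (String × List (String × Option Int)) :=
  (pvTypes meanings).map (fun t =>
    (t, [("easy", pvLastIndex meanings t "easy"), ("hard", pvLastIndex meanings t "hard")]))

-- ===== PRECONDITION & SPEC =====
-- Pre_ excludes exactly the inputs where Python A raises KeyError: a meaning without a "type" or "tag" key.
def Pre_get_topics (meanings : List (List (String × String))) : Prop :=
  (meanings.all (fun m => (m.map Prod.fst).contains "type" && (m.map Prod.fst).contains "tag")) = true
instance (meanings : List (List (String × String))) : Decidable (Pre_get_topics meanings) := by unfold Pre_get_topics; infer_instance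

def pvWitness_get_topics : (List (List (String × String))) :=
  [[("type", "a"), ("tag", "easy")], [("type", "a"), ("tag", "x")], [("type", "b"), ("tag", "easy")]]

def Spec_get_topics (meanings : List (List (String × String))) (out : List (String × List (String × Option Int))) : Prop := out = get_topics_alt meanings
instance (meanings : List (List (String × String))) (out : List (String × List (String × Option Int))) : Decidable (Spec_get_topics meanings out) := by unfold Spec_get_topics; infer_instance

-- ===== CLAIM (what is proved, stated in full; the proofs are below) =====
def Claim_equal_get_topics : Prop := ∀ (meanings : List (List (String × String))), Dom_get_topics meanings → Pre_get_topics meanings → Spec_get_topics meanings (get_topics meanings)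

-- ===== LEMMAS AND PROOFS =====

lemma enumerate_append_singleton {α : Type} (xs : List α) (y : α) (s : Int) :
    PySem.List.enumerate (xs ++ [y]) s = PySem.List.enumerate xs s ++ [(s + xs.length, y)] := by
  induction xs generalizing s with
  | nil => simp [PySem.List.enumerate_nil, PySem.List.enumerate_cons]
  | cons x xs ih =>
    simp [PySem.List.enumerate_cons, ih]
    ring_nf

lemma pvTypes_snoc (xs : List (List (String × String))) (m : List (String × String)) :
    pvTypes (xs ++ [m]) =
      if (pvTypes xs).contains (pyKey m "type") then pvTypes xs else pvTypes xs ++ [pyKey m "type"] := by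
  simp [pvTypes, List.foldl_append]

lemma pvLastIndex_snoc (xs : List (List (String × String))) (m : List (String × String)) (t slot : String) :
    pvLastIndex (xs ++ [m]) t slot =
      if pyKey m "type" == t && ((if pyKey m "tag" == "easy" then "easy" else "hard") == slot)
      then some (xs.length : Int) else pvLastIndex xs t slot := by
  simp [pvLastIndex, enumerate_append_singleton, List.foldl_append]

lemma pvTypes_nodup (xs : List (List (String × String))) : (pvTypes xs).Nodup := by
  induction xs using List.reverseRecOn with
  | nil => simp [pvTypes]
  | append_singleton xs m ih =>
    rw [pvTypes_snoc]
    split_ifs with h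
    · exact ih
    · simp at h
      exact List.Nodup.append ih (List.nodup_singleton _) (by simpa using h)

lemma pvTopicsDict_snoc (xs : List (List (String × String))) (m : List (String × String)) :
    pvTopicsDict (xs ++ [m]) =
      (if (pvTopicsDict xs).contains (pyKey m "type") then
        if pyKey m "tag" == "easy" then
          (pvTopicsDict xs).modify (pyKey m "type") PySem.Dict.empty (fun d => d.insert "easy" (some (xs.length : Int)))
        else
          (pvTopicsDict xs).modify (pyKey m "type") PySem.Dict.empty (fun d => d.insert "hard" (some (xs.length : Int)))
      else
        if pyKey m "tag" == "easy" then
          (pvTopicsDict xs).insert (pyKey m "type") (PySem.Dict.mk [("easy", some (xs.length : Int)), ("hard", none)])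
        else
          (pvTopicsDict xs).insert (pyKey m "type") (PySem.Dict.mk [("easy", none), ("hard", some (xs.length : Int))])) := by
  simp [pvTopicsDict, enumerate_append_singleton, List.foldl_append]

lemma pvLastIndex_eq_none_of_not_mem (xs : List (List (String × String))) (t slot : String)
    (h : t ∉ pvTypes xs) : pvLastIndex xs t slot = none := by
  induction xs using List.reverseRecOn with
  | nil => simp [pvLastIndex, PySem.List.enumerate_nil]
  | append_singleton xs m ih =>
    rw [pvTypes_snoc] at h
    rw [pvLastIndex_snoc]
    split_ifs at h with hc
    · have hne : pyKey m "type" ≠ t := by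
        intro he
        exact h (by simpa [he] using hc)
      simp [hne, ih h]
    · simp only [List.mem_append, List.mem_singleton, not_or] at h
      simp [Ne.symm h.2, ih h.1]

lemma pvInsert_easy (e h : Option Int) (v : Option Int) :
    (PySem.Dict.mk [("easy", e), ("hard", h)]).insert "easy" v =
      PySem.Dict.mk [("easy", v), ("hard", h)] := by
  apply PySem.Dict.ext
  simp [PySem.Dict.items_insert]

lemma pvInsert_hard (e h : Option Int) (v : Option Int) :
    (PySem.Dict.mk [("easy", e), ("hard", h)]).insert "hard" v =
      PySem.Dict.mk [("easy", e), ("hard", v)] := by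
  apply PySem.Dict.ext
  simp [PySem.Dict.items_insert]

lemma pvInvariant (xs : List (List (String × String))) :
    (pvTopicsDict xs).keys = pvTypes xs ∧
    ∀ t ∈ pvTypes xs, (pvTopicsDict xs).getD t PySem.Dict.empty =
      PySem.Dict.mk [("easy", pvLastIndex xs t "easy"), ("hard", pvLastIndex xs t "hard")] := by
  induction xs using List.reverseRecOn with
  | nil => simp [pvTopicsDict, pvTypes, pvLastIndex, PySem.List.enumerate_nil]
  | append_singleton xs m ih =>
    obtain ⟨ihk, ihv⟩ := ih
    rw [pvTopicsDict_snoc, pvTypes_snoc]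
    by_cases hc : (pyKey m "type") ∈ pvTypes xs
    · -- existing type: modify branch
      have hct : (pvTypes xs).contains (pyKey m "type") = true := by simpa using hc
      have hcb : (pvTopicsDict xs).contains (pyKey m "type") = true := by
        rw [PySem.Dict.contains_eq_decide_mem_keys, ihk]; simpa using hc
      simp only [hcb, if_true, hct]
      by_cases he : pyKey m "tag" == "easy"
      all_goals simp only [he, if_true, if_false, Bool.false_eq_true, PySem.Dict.modify]
      · constructor
        · rw [PySem.Dict.keys_insert_of_contains _ _ hcb, ihk]
        · intro t ht
          rw [PySem.Dict.getD_insert, pvLastIndex_snoc, pvLastIndex_snoc]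
          by_cases hteq : t = pyKey m "type"
          · subst hteq
            rw [if_pos rfl, ihv _ ht, pvInsert_easy]
            simp [he]
          · rw [if_neg hteq]
            simp [beq_iff_eq, Ne.symm hteq, ihv t ht]
      · constructor
        · rw [PySem.Dict.keys_insert_of_contains _ _ hcb, ihk]
        · intro t ht
          rw [PySem.Dict.getD_insert, pvLastIndex_snoc, pvLastIndex_snoc]
          by_cases hteq : t = pyKey m "type"
          · subst hteq
            rw [if_pos rfl, ihv _ ht, pvInsert_hard]
            simp [he]
          · rw [if_neg hteq]
            simp [beq_iff_eq, Ne.symm hteq, ihv t ht]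
    · -- new type: insert branch
      have hct : (pvTypes xs).contains (pyKey m "type") = false := by simpa using hc
      have hnc : (pvTopicsDict xs).contains (pyKey m "type") = false := by
        rw [PySem.Dict.contains_eq_decide_mem_keys, ihk]; simpa using hc
      simp only [hnc, if_false, hct, Bool.false_eq_true]
      have hnone : ∀ slot, pvLastIndex xs (pyKey m "type") slot = none :=
        fun slot => pvLastIndex_eq_none_of_not_mem xs _ slot hc
      by_cases he : pyKey m "tag" == "easy"
      all_goals simp only [he, if_true, if_false, Bool.false_eq_true]
      · constructor
        · rw [PySem.Dict.keys_insert_of_not_contains _ _ hnc, ihk]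
        · intro t ht
          rw [pvLastIndex_snoc, pvLastIndex_snoc]
          by_cases hteq : t = pyKey m "type"
          · subst hteq
            rw [PySem.Dict.getD_insert, if_pos rfl]
            simp [he, hnone]
          · rcases List.mem_append.mp ht with ht' | ht'
            · rw [PySem.Dict.getD_insert, if_neg hteq]
              simp [beq_iff_eq, Ne.symm hteq, ihv t ht']
            · exact absurd (List.mem_singleton.mp ht') hteq
      · constructor
        · rw [PySem.Dict.keys_insert_of_not_contains _ _ hnc, ihk]
        · intro t ht
          rw [pvLastIndex_snoc, pvLastIndex_snoc]
          by_cases hteq : t = pyKey m "type"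
          · subst hteq
            rw [PySem.Dict.getD_insert, if_pos rfl]
            simp [he, hnone]
          · rcases List.mem_append.mp ht with ht' | ht'
            · rw [PySem.Dict.getD_insert, if_neg hteq]
              simp [beq_iff_eq, Ne.symm hteq, ihv t ht']
            · exact absurd (List.mem_singleton.mp ht') hteq

-- ===== VERDICT (by name: the statement is the Claim_ definition above) =====
theorem get_topics_spec : Claim_equal_get_topics := by
  intro xs _ _
  unfold Spec_get_topics
  obtain ⟨hk, hv⟩ := pvInvariant xs
  have hnd : (pvTopicsDict xs).keys.Nodup := hk ▸ pvTypes_nodup xs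
  rw [get_topics, PySem.Dict.items_eq_map_keys _ hnd PySem.Dict.empty, hk, List.map_map,
      get_topics_alt]
  apply List.map_congr_left
  intro t ht
  simp [hv t ht]
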